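-- pv_equiv track=rewrite | github.com/Zhang-Zhaoji/scientific-bulletin | src/enrich_authors.py | get_priority_authors
-- ===== SOURCE A (Python) =====
-- from typing import List, Dict, Optional, Tuple
--
-- def get_priority_authors(authors: List[str]) -> List[Tuple[int, str]]:
--     """获取优先查询的作者：前3个 + 后3个（去重）"""
--     if not authors:
--         return []
--
--     n = len(authors)
--     indices = set()
--
--     for i in range(min(3, n)):
--         indices.add(i)
--
--     for i in range(max(0, n-3), n):
--         indices.add(i)
--
--     return [(i, authors[i]) for i in sorted(indices)]
-- ===== SOURCE B (Python) =====
-- def get_priority_authors(authors):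
--     n = len(authors)
--     return [(i, a) for i, a in enumerate(authors) if i < 3 or n - 3 <= i]
-- ===== Notes on version B (the rewrite author's own statement) =====
-- stated objective: simpler
-- what changed: Replaces the set accumulation + sort + indexed rebuild by a single filtered enumeration pass: keep (i, a) while walking the list once when i < 3 or i >= n - 3; no set, no sort, no indexing.
import Mathlib
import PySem

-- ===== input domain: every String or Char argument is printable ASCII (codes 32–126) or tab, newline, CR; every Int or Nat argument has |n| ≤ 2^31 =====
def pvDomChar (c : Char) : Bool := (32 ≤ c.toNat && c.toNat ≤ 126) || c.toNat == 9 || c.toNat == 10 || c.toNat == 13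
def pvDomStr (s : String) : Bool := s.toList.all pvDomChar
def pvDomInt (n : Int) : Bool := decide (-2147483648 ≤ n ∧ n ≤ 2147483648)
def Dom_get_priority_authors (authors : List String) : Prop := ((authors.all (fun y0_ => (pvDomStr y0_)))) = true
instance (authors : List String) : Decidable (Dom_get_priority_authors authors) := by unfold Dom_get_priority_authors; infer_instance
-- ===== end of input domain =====

-- B replaces A's set accumulation + sort + indexed rebuild by a single filtered enumeration pass; objective: simpler.

-- ===== PORT A =====
def get_priority_authors (authors : List String) : List (Int × String) :=
  if authors = [] then []
  else
    let n : Int := authors.length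
    let indices : PySem.Set Int := []
    let indices := (PySem.List.pyRange 0 (min 3 n) 1).foldl PySem.Set.add indices
    let indices := (PySem.List.pyRange (max 0 (n - 3)) n 1).foldl PySem.Set.add indices
    (PySem.List.sorted indices (fun x => x) false).map (fun i => (i, PySem.List.pyGetD authors i ""))

-- ===== PORT B =====
def get_priority_authors_alt (authors : List String) : List (Int × String) :=
  let n : Int := authors.length
  (PySem.List.enumerate authors 0).filter (fun p => decide (p.1 < 3) || decide (n - 3 ≤ p.1))

-- ===== PRECONDITION & SPEC =====
def Spec_get_priority_authors (authors : List String) (out : List (Int × String)) : Prop := out = get_priority_authors_alt authors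
instance (authors : List String) (out : List (Int × String)) : Decidable (Spec_get_priority_authors authors out) := by unfold Spec_get_priority_authors; infer_instance

-- ===== CLAIM =====
def Claim_equal_get_priority_authors : Prop := ∀ (authors : List String), Dom_get_priority_authors authors → Spec_get_priority_authors authors (get_priority_authors authors)

-- ===== LEMMAS AND PROOFS =====

-- The index set A accumulates, written as Set.update of Set.ofList.
theorem pvSetEq (n : Int) :
    (PySem.List.pyRange (max 0 (n - 3)) n 1).foldl PySem.Set.add
      ((PySem.List.pyRange 0 (min 3 n) 1).foldl PySem.Set.add ([] : PySem.Set Int))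
    = PySem.Set.update (PySem.Set.ofList (PySem.List.pyRange 0 (min 3 n) 1))
        (PySem.List.pyRange (max 0 (n - 3)) n 1) := by
  rfl

theorem pvMemSet (n i : Int) :
    i ∈ PySem.Set.update (PySem.Set.ofList (PySem.List.pyRange 0 (min 3 n) 1))
          (PySem.List.pyRange (max 0 (n - 3)) n 1)
      ↔ (0 ≤ i ∧ i < min 3 n) ∨ (max 0 (n - 3) ≤ i ∧ i < n) := by
  rw [PySem.Set.mem_update, PySem.Set.mem_ofList, PySem.List.mem_pyRange_one,
    PySem.List.mem_pyRange_one]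

-- sorted(indices) equals the range filtered by B's predicate.
theorem pvSortedEqFilter (n : Int) :
    PySem.List.sorted
      (PySem.Set.update (PySem.Set.ofList (PySem.List.pyRange 0 (min 3 n) 1))
        (PySem.List.pyRange (max 0 (n - 3)) n 1)) (fun x => x) false
    = (PySem.List.pyRange 0 n 1).filter (fun i => decide (i < 3) || decide (n - 3 ≤ i)) := by
  apply PySem.List.sorted_eq_of_perm_of_pairwise_lt
  · apply (List.perm_ext_iff_of_nodup
      ((PySem.List.nodup_pyRange_one _ _).filter _)
      (PySem.Set.nodup_update _ _ (PySem.Set.nodup_ofList _))).mpr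
    intro i
    rw [List.mem_filter, pvMemSet, PySem.List.mem_pyRange_one]
    simp only [Bool.or_eq_true, decide_eq_true_eq]
    omega
  · exact (PySem.List.pairwise_lt_pyRange_one 0 n).filter _

-- B's filtered enumeration as a filtered range mapped through pyGetD.
theorem pvAltEq (authors : List String) :
    get_priority_authors_alt authors
    = ((PySem.List.pyRange 0 authors.length 1).filter
        (fun i => decide (i < 3) || decide ((authors.length : Int) - 3 ≤ i))).map
        (fun i => (i, PySem.List.pyGetD authors i "")) := by
  unfold get_priority_authors_alt
  rw [PySem.List.enumerate_eq_map_pyRange (d := "")]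
  rw [List.filter_map]
  rfl

-- ===== VERDICT =====
theorem get_priority_authors_spec : Claim_equal_get_priority_authors := by
  intro authors _
  unfold Spec_get_priority_authors
  rw [pvAltEq]
  unfold get_priority_authors
  by_cases hnil : authors = []
  · subst hnil
    simp [PySem.List.pyRange]
  · simp only [if_neg hnil]
    rw [pvSetEq, pvSortedEqFilter]
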